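-- pv_equiv track=rewrite | github.com/will-hedges/advent-of-code | 2015/python/day_01_2015.py | floors
-- ===== SOURCE A (Python) =====
-- def floors(data):
--     floor = 0
--     data = tuple(data)
--     for index, char in enumerate(data):
--         if char == "(":
--             floor += 1
--         else:
--             floor -= 1
--             if floor < 0:
--                 return index + 1
--     return floor
-- ===== SOURCE B (Python) =====
-- def floors(data):
--     # Two-phase decomposition: materialize the full prefix-sum sequence, then scan it.
--     prefix = []
--     total = 0
--     for d in (1 if c == "(" else -1 for c in data):
--         total += d
--         prefix.append(total)
--     for i, f in enumerate(prefix):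
--         if f < 0:
--             return i + 1
--     return total
-- ===== Notes on version B (the rewrite author's own statement) =====
-- stated objective: alternative
-- what changed: Replaces A's single early-returning loop by a two-phase decomposition: first materialize the whole prefix-sum (running floor) sequence, then scan it for the first negative value, falling back to the final total.
import Mathlib
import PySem

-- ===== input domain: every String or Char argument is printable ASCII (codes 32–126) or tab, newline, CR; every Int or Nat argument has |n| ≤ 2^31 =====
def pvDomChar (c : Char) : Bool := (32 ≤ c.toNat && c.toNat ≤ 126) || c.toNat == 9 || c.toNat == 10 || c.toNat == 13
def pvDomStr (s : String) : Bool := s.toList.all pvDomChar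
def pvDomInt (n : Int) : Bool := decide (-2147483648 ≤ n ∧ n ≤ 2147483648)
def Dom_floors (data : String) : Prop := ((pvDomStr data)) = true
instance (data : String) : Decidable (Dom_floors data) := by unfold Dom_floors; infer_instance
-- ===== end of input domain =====

-- B replaces A's single early-returning loop by building the full prefix-sum sequence and then
-- scanning it for the first negative value (objective: alternative decomposition, same cost).

-- ===== PORT A =====
-- A: one loop, running floor, early return index+1 at the first negative floor.
def floorsLoop : List Char → Int → Int → Int
  | [], floor, _ => floor
  | c :: rest, floor, index =>
    if c = '(' then floorsLoop rest (floor + 1) (index + 1)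
    else
      if floor - 1 < 0 then index + 1
      else floorsLoop rest (floor - 1) (index + 1)

def floors (data : String) : Int := floorsLoop data.toList 0 0

-- ===== PORT B =====
-- B phase 1: build the prefix-sum list together with the final total.
def buildPrefix : List Int → Int → List Int × Int
  | [], total => ([], total)
  | d :: rest, total =>
    let t := total + d
    let (ps, tf) := buildPrefix rest t
    (t :: ps, tf)

-- B phase 2: scan the prefix sums for the first negative value.
def findNeg : List Int → Int → Option Int
  | [], _ => none
  | f :: rest, i => if f < 0 then some (i + 1) else findNeg rest (i + 1)

def floors_alt (data : String) : Int :=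
  let ds := data.toList.map (fun c => if c = '(' then (1 : Int) else -1)
  let (ps, total) := buildPrefix ds 0
  match findNeg ps 0 with
  | some k => k
  | none => total

-- ===== PRECONDITION & SPEC =====
def Spec_floors (data : String) (out : Int) : Prop := out = floors_alt data
instance (data : String) (out : Int) : Decidable (Spec_floors data out) := by unfold Spec_floors; infer_instance

-- ===== CLAIM (what is proved, stated in full; the proofs are below) =====
def Claim_equal_floors : Prop := ∀ (data : String), Dom_floors data → Spec_floors data (floors data)

-- ===== LEMMAS AND PROOFS =====
theorem floorsLoop_eq (l : List Char) : ∀ (floor index : Int), 0 ≤ floor →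
    floorsLoop l floor index =
      (match findNeg (buildPrefix (l.map (fun c => if c = '(' then (1 : Int) else -1)) floor).1 index with
       | some k => k
       | none => (buildPrefix (l.map (fun c => if c = '(' then (1 : Int) else -1)) floor).2) := by
  induction l with
  | nil => intro floor index _; simp [floorsLoop, buildPrefix, findNeg]
  | cons c rest ih =>
    intro floor index hfloor
    by_cases hc : c = '('
    · have h1 : ¬ (floor + 1 < 0) := by omega
      simp only [List.map, floorsLoop, buildPrefix, findNeg, hc, if_true, h1, if_false]
      exact ih (floor + 1) (index + 1) (by omega)
    · by_cases hneg : floor - 1 < 0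
      · have h2 : floor + -1 < 0 := by omega
        simp [List.map, floorsLoop, buildPrefix, findNeg, hc, hneg, h2]
      · have h2 : ¬ (floor + -1 < 0) := by omega
        simp only [List.map, floorsLoop, buildPrefix, findNeg, hc, if_false, hneg, h2]
        have := ih (floor - 1) (index + 1) (by omega)
        simpa [sub_eq_add_neg] using this

-- ===== VERDICT (by name: the statement is the Claim_ definition above) =====
theorem floors_spec : Claim_equal_floors := by
  intro data _
  unfold Spec_floors floors floors_alt
  have := floorsLoop_eq data.toList 0 0 le_rfl
  simpa using this
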